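-- pv_equiv track=rewrite | github.com/SoheilSaya/Unlim-challenges | emlaie zaban.py | can_form_number
-- ===== SOURCE A (Python) =====
-- def can_form_number(number, digits):
--     digit_count = {}
--     for digit in digits:
--         digit_count[digit] = digit_count.get(digit, 0) + 1
--
--     for char in number:
--         if char not in digit_count or digit_count[char] == 0:
--             return False
--         digit_count[char] -= 1
--
--     return True
-- ===== SOURCE B (Python) =====
-- def can_form_number(number, digits):
--     need = sorted(number)
--     have = sorted(digits)
--     i = 0
--     for ch in need:
--         while i < len(have) and have[i] < ch:
--             i += 1
--         if i == len(have) or have[i] != ch: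
--             return False
--         i += 1
--     return True
-- ===== Notes on version B (the rewrite author's own statement) =====
-- stated objective: alternative
-- what changed: Replaces A's hash-count table with decrement-on-demand by sorting both the characters of number and the digits list and running a single merge-style two-pointer scan that matches each needed character against the sorted supply (multiset containment via sorted merge, no dictionary at all).
import Mathlib
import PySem

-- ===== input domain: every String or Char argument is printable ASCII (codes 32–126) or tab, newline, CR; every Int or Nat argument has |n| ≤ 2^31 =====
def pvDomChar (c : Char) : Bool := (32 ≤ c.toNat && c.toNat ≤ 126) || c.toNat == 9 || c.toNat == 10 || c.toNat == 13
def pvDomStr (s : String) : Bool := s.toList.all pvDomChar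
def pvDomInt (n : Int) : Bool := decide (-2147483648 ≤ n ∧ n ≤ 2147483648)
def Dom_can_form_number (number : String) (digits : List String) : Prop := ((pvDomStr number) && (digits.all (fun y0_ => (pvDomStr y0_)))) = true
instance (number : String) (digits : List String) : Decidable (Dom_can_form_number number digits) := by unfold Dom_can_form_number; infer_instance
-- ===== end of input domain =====

-- B replaces A's hash-count table (decrement-on-demand) by sorting the characters of number
-- and the digits list and running one merge-style two-pointer scan over the two sorted lists
-- (multiset containment via sorted merge, no dictionary); a different algorithm, not faster.

-- ===== PORT A =====
-- the 'for char in number' loop with its early 'return False'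
def can_form_number_loop (d : PySem.Dict String Int) : List Char → Bool
  | [] => true
  | c :: cs =>
    let k := String.ofList [c]
    match d.get? k with
    | none => false
    | some v => if v = 0 then false else can_form_number_loop (d.insert k (v - 1)) cs

def can_form_number (number : String) (digits : List String) : Bool :=
  let digit_count := digits.foldl (fun d x => d.insert x (d.getD x 0 + 1)) PySem.Dict.empty
  can_form_number_loop digit_count number.toList

-- ===== PORT B =====
-- the inner 'while i < len(have) and have[i] < ch: i += 1' loop (remaining suffix = pointer)
def cfn_skip (ch : String) : List String -> List String
  | [] => []
  | h :: hs => if h < ch then cfn_skip ch hs else h :: hs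

-- the outer 'for ch in need' loop with its early returns
def cfn_go : List String -> List String -> Bool
  | [], _ => true
  | ch :: ns, hs =>
    match cfn_skip ch hs with
    | [] => false
    | h :: hs' => if h ≠ ch then false else cfn_go ns hs'

def can_form_number_alt (number : String) (digits : List String) : Bool :=
  let need := PySem.List.sorted (number.toList.map (fun c => String.ofList [c])) (fun x => x) false
  let haveL := PySem.List.sorted digits (fun x => x) false
  cfn_go need haveL

-- ===== PRECONDITION & SPEC =====
def Spec_can_form_number (number : String) (digits : List String) (out : Bool) : Prop := out = can_form_number_alt number digits
instance (number : String) (digits : List String) (out : Bool) : Decidable (Spec_can_form_number number digits out) := by unfold Spec_can_form_number; infer_instance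

-- ===== CLAIM (what is proved, stated in full; the proofs are below) =====
def Claim_equal_can_form_number : Prop := ∀ (number : String) (digits : List String), Dom_can_form_number number digits → Spec_can_form_number number digits (can_form_number number digits)

-- ===== LEMMAS AND PROOFS =====

theorem singleton_str_inj {x c : Char} (h : String.ofList [x] = String.ofList [c]) : x = c := by
  have := congrArg String.toList h
  simpa using this

-- invariant for A's loop: it succeeds iff every remaining char still has enough budget in d
theorem can_form_number_loop_iff (cs : List Char) (d : PySem.Dict String Int)
    (hd : ∀ k v, d.get? k = some v → 0 ≤ v) :
    can_form_number_loop d cs = true ↔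
      ∀ x ∈ cs, (cs.count x : Int) ≤ d.getD (String.ofList [x]) 0 := by
  induction cs generalizing d with
  | nil => simp [can_form_number_loop]
  | cons c cs ih =>
    constructor
    · intro h
      rw [can_form_number_loop] at h
      cases hg : d.get? (String.ofList [c]) with
      | none => simp [hg] at h
      | some v =>
        simp only [hg] at h
        by_cases hv0 : v = 0
        · simp [hv0] at h
        · simp only [if_neg hv0] at h
          have hv1 : 1 ≤ v := by
            have := hd _ _ hg; omega
          have hrec := (ih _ (by
            intro k w hw
            by_cases hk : k = String.ofList [c]
            · subst hk
              rw [PySem.Dict.get?_insert_self] at hw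
              cases hw; omega
            · rw [PySem.Dict.get?_insert_of_ne _ _ hk] at hw
              exact hd _ _ hw)).mp h
          intro x hx
          by_cases hxc : x = c
          · subst hxc
            have hgd : d.getD (String.ofList [x]) 0 = v := PySem.Dict.getD_of_get?_eq_some _ 0 hg
            by_cases hxcs : x ∈ cs
            · have := hrec x hxcs
              rw [PySem.Dict.getD_insert_self] at this
              simp only [List.count_cons_self]
              push_cast
              omega
            · rw [hgd, List.count_cons_self, List.count_eq_zero_of_not_mem hxcs]
              omega
          · have hxcs : x ∈ cs := by
              rcases List.mem_cons.mp hx with h | h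
              · exact absurd h hxc
              · exact h
            have := hrec x hxcs
            rw [PySem.Dict.getD_insert_of_ne _ _ _ (fun he => hxc (singleton_str_inj he))] at this
            have hcx : ¬ c = x := fun h => hxc h.symm
            simpa [List.count_cons, hcx] using this
    · intro h
      have hc := h c (List.mem_cons_self ..)
      have hc1 : (1 : Int) ≤ d.getD (String.ofList [c]) 0 := by
        rw [List.count_cons_self] at hc
        push_cast at hc
        omega
      cases hg : d.get? (String.ofList [c]) with
      | none =>
        rw [PySem.Dict.getD_eq_get?_getD, hg] at hc1
        simp only [Option.getD_none] at hc1
        omega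
      | some v =>
        have hgd : d.getD (String.ofList [c]) 0 = v := PySem.Dict.getD_of_get?_eq_some _ 0 hg
        have hv1 : 1 ≤ v := by omega
        rw [can_form_number_loop]
        simp only [hg, if_neg (by omega : ¬ v = 0)]
        apply (ih _ (by
          intro k w hw
          by_cases hk : k = String.ofList [c]
          · subst hk
            rw [PySem.Dict.get?_insert_self] at hw
            cases hw; omega
          · rw [PySem.Dict.get?_insert_of_ne _ _ hk] at hw
            exact hd _ _ hw)).mpr
        intro x hx
        by_cases hxc : x = c
        · subst hxc
          rw [PySem.Dict.getD_insert_self]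
          have := h x (List.mem_cons_self ..)
          rw [hgd] at this
          simp only [List.count_cons_self] at this
          push_cast at this ⊢
          omega
        · rw [PySem.Dict.getD_insert_of_ne _ _ _ (fun he => hxc (singleton_str_inj he))]
          have := h x (List.mem_cons_of_mem _ hx)
          have hcx : ¬ c = x := fun h => hxc h.symm
          simpa [List.count_cons, hcx] using this

-- the skip loop only discards elements, so its result is a sublist
theorem cfn_skip_sublist (ch : String) (hs : List String) : List.Sublist (cfn_skip ch hs) hs := by
  induction hs with
  | nil => simp [cfn_skip]
  | cons h t ih =>
    rw [cfn_skip]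
    by_cases hlt : h < ch
    · simp only [if_pos hlt]
      exact ih.cons h
    · simp only [if_neg hlt]
      exact List.Sublist.refl _

-- on a sorted pool containing ch, the skip loop stops exactly at a copy of ch and
-- discards only elements < ch (so counts of every x not below ch are preserved)
theorem cfn_skip_eq_cons {ch : String} {hs : List String}
    (hp : hs.Pairwise (fun a b => a ≤ b)) (hm : ch ∈ hs) :
    ∃ hs', cfn_skip ch hs = ch :: hs' ∧ ∀ x : String, ¬ x < ch → hs.count x = (ch :: hs').count x := by
  induction hs with
  | nil => cases hm
  | cons h t ih =>
    rw [cfn_skip]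
    by_cases hlt : h < ch
    · simp only [if_pos hlt]
      have hne : ch ≠ h := fun e => absurd hlt (by rw [e]; exact lt_irrefl _)
      have hm' : ch ∈ t := by
        rcases List.mem_cons.mp hm with e | h'
        · exact absurd e hne
        · exact h'
      obtain ⟨hs', he, hc⟩ := ih (List.pairwise_cons.mp hp).2 hm'
      refine ⟨hs', he, fun x hx => ?_⟩
      have hxh : x ≠ h := fun e => hx (e ▸ hlt)
      simpa [List.count_cons, Ne.symm hxh] using hc x hx
    · simp only [if_neg hlt]
      have heq : ch = h := by
        rcases List.mem_cons.mp hm with e | h'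
        · exact e
        · exact le_antisymm (not_lt.mp hlt) ((List.pairwise_cons.mp hp).1 ch h')
      exact ⟨t, by rw [heq], fun x _ => by rw [heq]⟩

-- soundness of the merge scan: success implies multiset containment (no sortedness needed)
theorem cfn_go_sound : ∀ (ns hs : List String), cfn_go ns hs = true →
    ∀ x : String, ns.count x ≤ hs.count x := by
  intro ns
  induction ns with
  | nil => intro hs _ x; simp
  | cons ch ns ih =>
    intro hs h x
    rw [cfn_go] at h
    cases hsk : cfn_skip ch hs with
    | nil => rw [hsk] at h; simp at h
    | cons h0 hs' =>
      rw [hsk] at h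
      by_cases hh : h0 = ch
      · simp only [hh, ne_eq, not_true_eq_false, if_false] at h
        have h1 := ih hs' h x
        have h2 : (ch :: hs').count x ≤ hs.count x := by
          have : List.Sublist (ch :: hs') hs := by rw [← hh, ← hsk]; exact cfn_skip_sublist ch hs
          exact this.count_le x
        simp only [List.count_cons] at h2 ⊢
        omega
      · simp [hh] at h

-- completeness: multiset containment of sorted lists makes the merge scan succeed
theorem cfn_go_complete : ∀ (ns hs : List String),
    ns.Pairwise (fun a b => a ≤ b) → hs.Pairwise (fun a b => a ≤ b) →
    (∀ x : String, ns.count x ≤ hs.count x) → cfn_go ns hs = true := by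
  intro ns
  induction ns with
  | nil => intro hs _ _ _; rfl
  | cons ch ns ih =>
    intro hs hns hhs hcnt
    have hch : ch ∈ hs := by
      have h1 := hcnt ch
      rw [List.count_cons_self] at h1
      exact List.count_pos_iff.mp (by omega)
    obtain ⟨hs', hsk, hc⟩ := cfn_skip_eq_cons hhs hch
    rw [cfn_go, hsk]
    simp only [ne_eq, not_true_eq_false, if_false]
    have hsub : List.Sublist (ch :: hs') hs := hsk ▸ cfn_skip_sublist ch hs
    have hhs' : hs'.Pairwise (fun a b => a ≤ b) :=
      (List.pairwise_cons.mp (List.Pairwise.sublist hsub hhs)).2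
    apply ih hs' (List.pairwise_cons.mp hns).2 hhs'
    intro x
    by_cases hx : x < ch
    · have hxn : x ∉ ns := fun hm =>
        absurd hx (not_lt.mpr ((List.pairwise_cons.mp hns).1 x hm))
      rw [List.count_eq_zero_of_not_mem hxn]
      exact Nat.zero_le _
    · have h1 := hc x hx
      have h2 := hcnt x
      rw [h1] at h2
      simp only [List.count_cons] at h2
      omega

theorem can_form_number_spec : Claim_equal_can_form_number := by
  unfold Claim_equal_can_form_number
  intro number digits _
  unfold Spec_can_form_number can_form_number can_form_number_alt
  simp only []
  rw [PySem.Dict.foldl_insert_getD_add_one_eq_counter]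
  have hA := can_form_number_loop_iff number.toList (PySem.Dict.counter digits) (by
    intro k v hv
    have := PySem.Dict.getD_of_get?_eq_some _ 0 hv
    rw [PySem.Dict.getD_counter] at this
    omega)
  have hinj : Function.Injective (fun c : Char => String.ofList [c]) :=
    fun a b h => singleton_str_inj h
  -- the two sorted lists are permutations of their sources, so counts carry over
  have hpn := PySem.List.sorted_perm (number.toList.map (fun c => String.ofList [c])) (fun x => x) false
  have hpd := PySem.List.sorted_perm digits (fun x => x) false
  rw [Bool.eq_iff_iff, hA]
  constructor
  · -- A succeeds → every char count fits → merge scan succeeds on the sorted lists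
    intro h
    apply cfn_go_complete
    · exact PySem.List.sorted_pairwise _ _
    · exact PySem.List.sorted_pairwise _ _
    · intro s
      rw [hpn.count_eq, hpd.count_eq]
      by_cases hmem : s ∈ number.toList.map (fun c => String.ofList [c])
      · obtain ⟨x, hx, rfl⟩ := List.mem_map.mp hmem
        rw [List.count_map_of_injective _ _ hinj]
        have := h x hx
        rw [PySem.Dict.getD_counter] at this
        exact_mod_cast this
      · rw [List.count_eq_zero_of_not_mem hmem]
        exact Nat.zero_le _
  · -- merge scan succeeds → counts fit → A succeeds
    intro h x hx
    have hs := cfn_go_sound _ _ h (String.ofList [x])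
    rw [hpn.count_eq, hpd.count_eq, List.count_map_of_injective _ _ hinj] at hs
    rw [PySem.Dict.getD_counter]
    exact_mod_cast hs
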